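-- pv_equiv track=rewrite | github.com/theneume/lohainteractive | natal_calculator.py | get_year_order
-- ===== SOURCE A (Python) =====
-- def get_year_order(year: int) -> int:
--     """Calculates the unique year order (1-9 cycle) based on the provided year."""
--     years = {}
--     year_order_counter = 1
--     # Range from 1919 to 2030
--     for y in range(1919, 2031):
--         years[y] = year_order_counter
--         if year_order_counter == 9:
--             year_order_counter = 0
--         year_order_counter += 1
--     return years.get(year, -1)
-- ===== SOURCE B (Python) =====
-- def get_year_order(year: int) -> int:
--     """Calculates the unique year order (1-9 cycle) based on the provided year."""
--     if 1919 <= year <= 2030: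
--         return (year - 1919) % 9 + 1
--     return -1
-- ===== Notes on version B (the rewrite author's own statement) =====
-- stated objective: simpler
-- what changed: Replaced building a lookup dict over the whole supported year range with a direct range-checked modular closed form.
import Mathlib
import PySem

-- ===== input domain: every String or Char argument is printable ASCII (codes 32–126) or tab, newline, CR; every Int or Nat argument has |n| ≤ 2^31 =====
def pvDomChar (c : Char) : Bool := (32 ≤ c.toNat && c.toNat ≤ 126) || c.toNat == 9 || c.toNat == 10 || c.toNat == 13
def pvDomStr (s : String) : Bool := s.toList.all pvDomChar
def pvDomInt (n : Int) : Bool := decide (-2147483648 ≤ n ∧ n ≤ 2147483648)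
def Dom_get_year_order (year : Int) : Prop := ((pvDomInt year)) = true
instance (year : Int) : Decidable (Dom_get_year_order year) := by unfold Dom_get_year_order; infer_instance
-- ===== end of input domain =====

-- B replaces A's build-a-dict-then-look-up with a direct range-checked modular closed form (simpler).

-- ===== PORT A =====
-- the loop body: insert years[y] = counter, then update the counter as Python does
def pvStepA (s : PySem.Dict Int Int × Int) (y : Int) : PySem.Dict Int Int × Int :=
  let d := s.1.insert y s.2
  let c := if s.2 == 9 then (0 : Int) else s.2
  (d, c + 1)

def get_year_order (year : Int) : Int :=
  let st := (PySem.List.pyRange 1919 2031 1).foldl pvStepA (PySem.Dict.empty, 1)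
  st.1.getD year (-1)

-- ===== PORT B =====
def get_year_order_alt (year : Int) : Int :=
  if 1919 ≤ year ∧ year ≤ 2030 then (year - 1919) % 9 + 1 else -1

-- ===== PRECONDITION & SPEC =====
def Spec_get_year_order (year : Int) (out : Int) : Prop := out = get_year_order_alt year
instance (year : Int) (out : Int) : Decidable (Spec_get_year_order year out) := by unfold Spec_get_year_order; infer_instance

-- ===== CLAIM (what is proved, stated in full; the proofs are below) =====
def Claim_equal_get_year_order : Prop := ∀ (year : Int), Dom_get_year_order year → Spec_get_year_order year (get_year_order year)

-- ===== LEMMAS AND PROOFS =====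

-- loop invariant: after n steps the dict maps exactly [1919, 1919+n) by the cycle,
-- and the counter sits at n % 9 + 1
theorem pv_loop_inv (n : Nat) :
    (∀ y : Int,
      ((PySem.List.pyRange 1919 (1919 + (n : Int)) 1).foldl pvStepA (PySem.Dict.empty, 1)).1.getD y (-1)
        = if 1919 ≤ y ∧ y < 1919 + (n : Int) then (y - 1919) % 9 + 1 else -1) ∧
    ((PySem.List.pyRange 1919 (1919 + (n : Int)) 1).foldl pvStepA (PySem.Dict.empty, 1)).2
        = (n : Int) % 9 + 1 := by
  induction n with
  | zero =>
      constructor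
      · intro y; simp
      · simp
  | succ n ih =>
      obtain ⟨ihd, ihc⟩ := ih
      have hsplit : PySem.List.pyRange 1919 (1919 + ((n + 1 : Nat) : Int)) 1
          = PySem.List.pyRange 1919 (1919 + (n : Int)) 1 ++ [1919 + (n : Int)] := by
        have : (1919 + ((n + 1 : Nat) : Int)) = (1919 + (n : Int)) + 1 := by push_cast; ring
        rw [this, PySem.List.pyRange_one_succ_right (by omega)]
      rw [hsplit, List.foldl_append]
      constructor
      · intro y
        simp only [List.foldl, pvStepA]
        by_cases hy : y = 1919 + (n : Int)
        · subst hy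
          rw [PySem.Dict.getD_insert_self, ihc]
          have : 1919 ≤ 1919 + (n : Int) ∧ 1919 + (n : Int) < 1919 + ((n + 1 : Nat) : Int) := by
            push_cast; omega
          rw [if_pos this]
          omega
        · rw [PySem.Dict.getD_insert_of_ne _ _ _ hy, ihd y]
          by_cases h1 : 1919 ≤ y ∧ y < 1919 + (n : Int)
          · rw [if_pos h1, if_pos (by push_cast at *; omega)]
          · rw [if_neg h1, if_neg (by push_cast at *; omega)]
      · simp only [List.foldl, pvStepA, ihc]
        have h9 : ((n : Int) % 9 + 1 == 9) = decide ((n : Int) % 9 = 8) := by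
          by_cases h : (n : Int) % 9 = 8 <;> simp [h] <;> omega
        rw [h9]
        by_cases h : (n : Int) % 9 = 8
        · rw [if_pos (by simp [h])]; push_cast; omega
        · rw [if_neg (by simp [h])]; push_cast; omega

-- ===== VERDICT (by name: the statement is the Claim_ definition above) =====
theorem get_year_order_spec : Claim_equal_get_year_order := by
  intro year _
  unfold Spec_get_year_order get_year_order get_year_order_alt
  have h := (pv_loop_inv 112).1 year
  norm_num at h ⊢
  rw [h]
  by_cases hy : 1919 ≤ year ∧ year ≤ 2030
  · rw [if_pos (by omega), if_pos hy]
  · rw [if_neg (by omega), if_neg hy]
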